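-- pv_equiv track=rewrite | github.com/laurent-leconte/advent-of-code | 2025/day4.py | list_removable
-- ===== SOURCE A (Python) =====
-- def adjacent(i: int, j: int) -> list[tuple[int, int]]:
--     return [(i-1, j-1), (i-1, j), (i-1, j+1),
--             (i, j-1), (i, j+1),
--             (i+1, j-1), (i+1, j), (i+1, j+1)]
--
-- def list_removable(board: list[list[str]]) -> list[tuple[int, int]]:
--     result = []
--     width = len(board[0])
--     height = len(board)
--     for y in range(1, height-1):
--         for x in range(1, width-1):
--             if board[y][x] == '@':
--                 # count adjacent '@'
--                 count = sum(1 for (i, j) in adjacent(y, x) if board[i][j] == '@')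
--                 if count < 4:
--                     result.append((y, x))
--     return result
-- ===== SOURCE B (Python) =====
-- def list_removable(board: list[list[str]]) -> list[tuple[int, int]]:
--     height = len(board)
--     width = len(board[0])
--     if height < 3 or width < 3:
--         return []
--     # scatter pass: every '@' cell marks its 8 neighbours
--     marks = []
--     for y in range(height):
--         for x in range(width):
--             if board[y][x] == '@':
--                 for dy in (-1, 0, 1):
--                     for dx in (-1, 0, 1):
--                         if dy or dx:
--                             marks.append((y + dy, x + dx))
--     # tally the marks
--     count = {}
--     for p in marks:
--         count[p] = count.get(p, 0) + 1
--     # selection pass over interior cells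
--     return [(y, x) for y in range(1, height - 1) for x in range(1, width - 1)
--             if board[y][x] == '@' and count.get((y, x), 0) < 4]
-- ===== Notes on version B (the rewrite author's own statement) =====
-- stated objective: alternative
-- what changed: A gathers: for each interior cell it scans its 8 neighbours on demand; B scatters: one pass over the whole board lets every '@' cell mark its 8 neighbours in a dictionary tally, and a second interior pass selects cells whose tally is below 4.
-- outside the precondition, e.g. on list_removable([['a', 'a', 'a'], ['a', 'a', 'a'], ['a']]): A returns [], B raises IndexError
import Mathlib
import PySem

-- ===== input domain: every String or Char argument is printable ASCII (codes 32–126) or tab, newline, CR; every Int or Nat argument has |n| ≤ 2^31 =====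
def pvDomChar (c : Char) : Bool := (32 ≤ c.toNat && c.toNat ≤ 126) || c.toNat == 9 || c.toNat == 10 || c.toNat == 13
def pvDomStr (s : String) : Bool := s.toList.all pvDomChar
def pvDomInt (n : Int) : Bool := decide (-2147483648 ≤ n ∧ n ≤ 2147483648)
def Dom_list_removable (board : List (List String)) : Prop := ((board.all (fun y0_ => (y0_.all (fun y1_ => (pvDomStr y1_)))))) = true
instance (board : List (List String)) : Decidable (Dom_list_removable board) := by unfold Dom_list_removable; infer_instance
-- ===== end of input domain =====

-- B replaces A's per-cell neighbour gathering by a single scatter pass that lets every '@' cell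
-- mark its 8 neighbours, tallies the marks in a dictionary, and then selects the interior cells
-- (objective: alternative decomposition, same asymptotic cost).

-- ===== PORT A =====
def adjacent (i j : Int) : List (Int × Int) :=
  [(i-1, j-1), (i-1, j), (i-1, j+1),
   (i, j-1), (i, j+1),
   (i+1, j-1), (i+1, j), (i+1, j+1)]

-- board[i][j] (both Pythons index identically; in range for every access made on inputs admitted by Pre_)
def cellA (board : List (List String)) (i j : Int) : String :=
  PySem.List.pyGetD (PySem.List.pyGetD board i []) j ""

def list_removable (board : List (List String)) : List (Int × Int) :=
  let width : Int := (PySem.List.pyGetD board 0 []).length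
  let height : Int := board.length
  (PySem.List.pyRange 1 (height - 1) 1).foldl (fun result y =>
    (PySem.List.pyRange 1 (width - 1) 1).foldl (fun result x =>
      if cellA board y x == "@" then
        let count : Int := ((adjacent y x).filter (fun p => cellA board p.1 p.2 == "@")).length
        if count < 4 then result ++ [(y, x)] else result
      else result) result) []

-- ===== PORT B =====

def list_removable_alt (board : List (List String)) : List (Int × Int) :=
  let height : Int := board.length
  let width : Int := (PySem.List.pyGetD board 0 []).length
  if height < 3 ∨ width < 3 then []
  else
    let marks : List (Int × Int) :=
      (PySem.List.pyRange 0 height 1).foldl (fun m y =>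
        (PySem.List.pyRange 0 width 1).foldl (fun m x =>
          if cellA board y x == "@" then
            ([-1, 0, 1] : List Int).foldl (fun m dy =>
              ([-1, 0, 1] : List Int).foldl (fun m dx =>
                if dy ≠ 0 ∨ dx ≠ 0 then m ++ [(y + dy, x + dx)] else m) m) m
          else m) m) []
    let count : PySem.Dict (Int × Int) Int :=
      marks.foldl (fun d p => d.insert p (d.getD p 0 + 1)) PySem.Dict.empty
    (PySem.List.pyRange 1 (height - 1) 1).foldl (fun res y =>
      (PySem.List.pyRange 1 (width - 1) 1).foldl (fun res x =>
        if cellA board y x == "@" ∧ count.getD (y, x) 0 < 4 then res ++ [(y, x)] else res) res) []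

-- ===== PRECONDITION & SPEC =====
-- Pre_ excludes the empty board (A raises IndexError on len(board[0])) and, when the board is at
-- least 3×3 as measured by its first row, boards with a row shorter than the first row (on such
-- boards A either raises IndexError or, when the short row happens never to be indexed, returns a
-- value that depends on which cells hold '@'; B raises IndexError there).
def Pre_list_removable (board : List (List String)) : Prop :=
  board ≠ [] ∧ (3 ≤ (board.length : Int) → 3 ≤ ((board.headD []).length : Int) →
    ∀ row ∈ board, (board.headD []).length ≤ row.length)
instance (board : List (List String)) : Decidable (Pre_list_removable board) := by
  unfold Pre_list_removable; infer_instance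

def pvWitness_list_removable : List (List String) :=
  [["@", ".", "@"], [".", "@", "."], ["@", ".", "@"]]

def Spec_list_removable (board : List (List String)) (out : List (Int × Int)) : Prop := out = list_removable_alt board
instance (board : List (List String)) (out : List (Int × Int)) : Decidable (Spec_list_removable board out) := by unfold Spec_list_removable; infer_instance

-- ===== CLAIM (what is proved, stated in full; the proofs are below) =====
def Claim_equal_list_removable : Prop := ∀ (board : List (List String)), Dom_list_removable board → Pre_list_removable board → Spec_list_removable board (list_removable board)

-- ===== LEMMAS AND PROOFS =====

-- cell predicate shared by the proofs
def isAt (board : List (List String)) (q : Int × Int) : Bool :=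
  cellA board q.1 q.2 == "@"


-- the dy/dx double loop of B appends exactly A's `adjacent` list
lemma neigh_fold (m : List (Int × Int)) (y x : Int) :
    ([-1, 0, 1] : List Int).foldl (fun m dy =>
      ([-1, 0, 1] : List Int).foldl (fun m dx =>
        if dy ≠ 0 ∨ dx ≠ 0 then m ++ [(y + dy, x + dx)] else m) m) m
    = m ++ adjacent y x := by
  simp [List.foldl, adjacent]
  norm_num [sub_eq_add_neg]

-- the marks list, flattened
def marksOf (board : List (List String)) : List (Int × Int) :=
  (PySem.List.pyRange 0 (board.length : Int) 1).flatMap (fun y =>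
    (PySem.List.pyRange 0 ((PySem.List.pyGetD board 0 []).length : Int) 1).flatMap (fun x =>
      if isAt board (y, x) then adjacent y x else []))

lemma nodup_adjacent (i j : Int) : (adjacent i j).Nodup := by
  simp [adjacent, Prod.ext_iff]
  omega

lemma mem_adjacent_symm (a b y x : Int) :
    ((y, x) ∈ adjacent a b) ↔ ((a, b) ∈ adjacent y x) := by
  simp [adjacent, Prod.ext_iff]
  omega

lemma count_flatMap_eq_countP {α β : Type} [BEq β] [LawfulBEq β] (l : List α) (g : α → List β)
    (b : β) (P : α → Bool) (h : ∀ a ∈ l, (g a).count b = if P a then 1 else 0) :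
    (l.flatMap g).count b = l.countP P := by
  induction l with
  | nil => simp
  | cons a t ih =>
    simp only [List.flatMap_cons, List.count_append, List.countP_cons]
    rw [h a (by simp), ih (fun a ha => h a (by simp [ha]))]
    split_ifs <;> simp_all
    omega

-- the grid of all coordinates, row-major
def pairsOf (h w : Int) : List (Int × Int) :=
  (PySem.List.pyRange 0 h 1).flatMap (fun y => (PySem.List.pyRange 0 w 1).map (fun x => (y, x)))

lemma mem_pairsOf (h w : Int) (p : Int × Int) :
    p ∈ pairsOf h w ↔ (0 ≤ p.1 ∧ p.1 < h ∧ 0 ≤ p.2 ∧ p.2 < w) := by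
  obtain ⟨a, c⟩ := p
  simp only [pairsOf, List.mem_flatMap, List.mem_map, PySem.List.mem_pyRange_one, Prod.ext_iff]
  constructor
  · rintro ⟨u, hu, v, hv, h1, h2⟩; subst h1; subst h2; omega
  · rintro ⟨h1, h2, h3, h4⟩; exact ⟨a, ⟨h1, h2⟩, c, ⟨h3, h4⟩, rfl, rfl⟩

lemma nodup_pairsOf (h w : Int) : (pairsOf h w).Nodup := by
  apply List.nodup_flatMap.mpr
  refine ⟨fun y _ => (PySem.List.nodup_pyRange_one 0 w).map
    (fun a b hab => congrArg Prod.snd hab), ?_⟩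
  refine (PySem.List.nodup_pyRange_one 0 h).imp ?_
  intro a b hab
  simp only [List.Disjoint, List.mem_map]
  rintro p ⟨q, _, rfl⟩ ⟨r, _, hr⟩
  exact hab (congrArg Prod.fst hr).symm

lemma mem_adjacent_iff (a b y x : Int) :
    ((a, b) ∈ adjacent y x) ↔ (y - 1 ≤ a ∧ a ≤ y + 1 ∧ x - 1 ≤ b ∧ b ≤ x + 1 ∧ ¬(a = y ∧ b = x)) := by
  simp [adjacent, Prod.ext_iff]
  omega

lemma marksOf_eq (board : List (List String)) :
    marksOf board
    = (pairsOf (board.length : Int) ((PySem.List.pyGetD board 0 []).length : Int)).flatMap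
        (fun q => if isAt board q then adjacent q.1 q.2 else []) := by
  rw [pairsOf, List.flatMap_assoc]
  simp [List.flatMap_map, marksOf]

-- the scatter count at an interior cell is A's gathered neighbour count
lemma count_marks (board : List (List String)) (y x : Int)
    (hy1 : 1 ≤ y) (hy2 : y < (board.length : Int) - 1)
    (hx1 : 1 ≤ x) (hx2 : x < ((PySem.List.pyGetD board 0 []).length : Int) - 1) :
    (marksOf board).count (y, x) = (adjacent y x).countP (isAt board) := by
  rw [marksOf_eq]
  rw [count_flatMap_eq_countP _ _ _ (fun q => isAt board q && decide (q ∈ adjacent y x))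
    (fun q _ => ?_)]
  · rw [List.countP_eq_length_filter, List.countP_eq_length_filter]
    apply List.Perm.length_eq
    apply (List.perm_ext_iff_of_nodup ((nodup_pairsOf _ _).filter _)
      ((nodup_adjacent y x).filter _)).mpr
    intro q
    obtain ⟨a, b⟩ := q
    simp only [List.mem_filter, mem_pairsOf, Bool.and_eq_true, decide_eq_true_eq]
    constructor
    · rintro ⟨_, hAt, hmem⟩
      exact ⟨hmem, hAt⟩
    · rintro ⟨hmem, hAt⟩
      have hb := (mem_adjacent_iff a b y x).mp hmem
      exact ⟨⟨by omega, by omega, by omega, by omega⟩, hAt, hmem⟩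
  · by_cases h1 : isAt board q
    · simp only [h1, if_true, Bool.true_and]
      by_cases h2 : (y, x) ∈ adjacent q.1 q.2
      · rw [List.count_eq_one_of_mem (nodup_adjacent q.1 q.2) h2]
        have : q ∈ adjacent y x := by
          obtain ⟨a, b⟩ := q; exact (mem_adjacent_symm a b y x).mp h2
        simp [this]
      · rw [List.count_eq_zero.mpr h2]
        have : q ∉ adjacent y x := by
          obtain ⟨a, b⟩ := q; exact fun hc => h2 ((mem_adjacent_symm a b y x).mpr hc)
        simp [this]
    · simp [h1]

lemma foldl_id {α β : Type} (l : List β) (init : α) : l.foldl (fun a _ => a) init = init := by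
  induction l generalizing init <;> simp_all

-- B's scatter loop builds exactly marksOf
lemma marks_fold (board : List (List String)) :
    (PySem.List.pyRange 0 (board.length : Int) 1).foldl (fun m y =>
      (PySem.List.pyRange 0 ((PySem.List.pyGetD board 0 []).length : Int) 1).foldl (fun m x =>
        if cellA board y x == "@" then
          ([-1, 0, 1] : List Int).foldl (fun m dy =>
            ([-1, 0, 1] : List Int).foldl (fun m dx =>
              if dy ≠ 0 ∨ dx ≠ 0 then m ++ [(y + dy, x + dx)] else m) m) m
        else m) m) []
    = marksOf board := by
  have hin : ∀ (y : Int) (m : List (Int × Int)),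
      (PySem.List.pyRange 0 ((PySem.List.pyGetD board 0 []).length : Int) 1).foldl (fun m x =>
        if cellA board y x == "@" then
          ([-1, 0, 1] : List Int).foldl (fun m dy =>
            ([-1, 0, 1] : List Int).foldl (fun m dx =>
              if dy ≠ 0 ∨ dx ≠ 0 then m ++ [(y + dy, x + dx)] else m) m) m
        else m) m
      = m ++ (PySem.List.pyRange 0 ((PySem.List.pyGetD board 0 []).length : Int) 1).flatMap
          (fun x => if isAt board (y, x) then adjacent y x else []) := by
    intro y m
    refine (PySem.List.foldl_congr_mem _ _
      (fun m x => m ++ (if isAt board (y, x) then adjacent y x else [])) m ?_).trans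
      (PySem.List.foldl_append_eq_flatMap _ _ _)
    intro acc x _
    rw [neigh_fold]
    by_cases hc : isAt board (y, x)
    · simp only [isAt] at hc ⊢; simp [hc]
    · simp only [isAt] at hc ⊢; simp [hc]
  refine (PySem.List.foldl_congr_mem _ _
    (fun m y => m ++ (PySem.List.pyRange 0 ((PySem.List.pyGetD board 0 []).length : Int) 1).flatMap
      (fun x => if isAt board (y, x) then adjacent y x else [])) []
    (fun acc y _ => hin y acc)).trans ?_
  rw [PySem.List.foldl_append_eq_flatMap]
  simp [marksOf]

lemma isAt_apply (board : List (List String)) :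
    isAt board = (fun p : Int × Int => cellA board p.1 p.2 == "@") := rfl

theorem list_removable_spec : Claim_equal_list_removable := by
  intro board _ _
  unfold Spec_list_removable
  simp only [list_removable, list_removable_alt]
  by_cases hs : (board.length : Int) < 3 ∨ ((PySem.List.pyGetD board 0 []).length : Int) < 3
  · rw [if_pos hs]
    rcases hs with hs | hs
    · rw [PySem.List.pyRange_one_eq_nil (a := 1) (b := (board.length : Int) - 1) (by omega)]
      rfl
    · rw [PySem.List.pyRange_one_eq_nil (a := 1)
        (b := ((PySem.List.pyGetD board 0 []).length : Int) - 1) (by omega)]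
      simp only [List.foldl_nil]
      exact foldl_id _ _
  · rw [if_neg hs]
    simp only [not_or, not_lt] at hs
    rw [marks_fold]
    apply PySem.List.foldl_congr_mem
    intro acc y hy
    apply PySem.List.foldl_congr_mem
    intro acc2 x hx
    rw [PySem.List.mem_pyRange_one] at hy hx
    rw [PySem.Dict.getD_foldl_insert_add_one]
    rw [PySem.Dict.getD_empty]
    rw [count_marks board y x (by omega) (by omega) (by omega) (by omega)]
    simp only [List.countP_eq_length_filter, isAt_apply]
    split_ifs with h1 h2 h3 <;> simp_all
    omega
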